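-- pv_equiv track=rewrite | github.com/wztan004/driving-backend | main.py | get_question_position
-- ===== SOURCE A (Python) =====
-- def get_question_position(arr, header_arr, button_arr):
--     pos = 0
--     result = []
--     while pos < len(arr):
--         if pos in header_arr:
--             pos += 1
--             continue
--         if pos in button_arr:
--             break
--         result.append(pos)
--         pos += 1
--     return result
-- ===== SOURCE B (Python) =====
-- def get_question_position(arr, header_arr, button_arr):
--     n = len(arr)
--     stop = next((p for p in range(n) if p not in header_arr and p in button_arr), n)
--     return [p for p in range(stop) if p not in header_arr]
-- ===== Notes on version B (the rewrite author's own statement) =====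
-- stated objective: simpler
-- what changed: Replaces the interleaved while-loop with break/continue by a locate-then-filter decomposition: first find the stop index (first non-header button position) in one generator pass, then build the result as a comprehension over the prefix.
import Mathlib
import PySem

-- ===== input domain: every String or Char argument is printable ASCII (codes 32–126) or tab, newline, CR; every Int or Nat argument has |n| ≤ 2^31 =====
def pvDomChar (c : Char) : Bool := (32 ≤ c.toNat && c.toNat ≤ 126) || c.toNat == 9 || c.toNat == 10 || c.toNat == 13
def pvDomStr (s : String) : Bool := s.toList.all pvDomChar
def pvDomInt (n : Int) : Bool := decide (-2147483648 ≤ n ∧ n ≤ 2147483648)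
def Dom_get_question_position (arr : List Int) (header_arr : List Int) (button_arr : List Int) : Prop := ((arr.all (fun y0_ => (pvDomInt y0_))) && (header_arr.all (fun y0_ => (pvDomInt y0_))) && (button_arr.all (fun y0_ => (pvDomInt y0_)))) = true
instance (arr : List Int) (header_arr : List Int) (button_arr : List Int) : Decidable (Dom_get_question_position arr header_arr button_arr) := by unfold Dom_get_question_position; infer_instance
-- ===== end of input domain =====

-- B replaces A's interleaved while-loop (break/continue) by a locate-then-filter decomposition: same values, simpler structure.


-- ===== PORT A =====
-- A's while-loop: pos starts at 0 and grows by 1 each iteration, stopping when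
-- pos = len(arr); we run it on the (len(arr) - pos) remaining iterations, which
-- is exactly the loop-guard 'pos < len(arr)'.
def getQPLoop (header_arr button_arr : List Int) (remaining : Nat) (pos : Int) : List Int :=
  match remaining with
  | 0 => []
  | r + 1 =>
    if header_arr.contains pos then getQPLoop header_arr button_arr r (pos + 1)
    else if button_arr.contains pos then []
    else pos :: getQPLoop header_arr button_arr r (pos + 1)

def get_question_position (arr : List Int) (header_arr : List Int) (button_arr : List Int) : List Int :=
  getQPLoop header_arr button_arr arr.length 0

-- ===== PORT B =====
def get_question_position_alt (arr : List Int) (header_arr : List Int) (button_arr : List Int) : List Int :=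
  let n : Int := (arr.length : Int)
  let stop : Int :=
    ((PySem.List.pyRange 0 n 1).find?
      (fun p => !header_arr.contains p && button_arr.contains p)).getD n
  (PySem.List.pyRange 0 stop 1).filter (fun p => !header_arr.contains p)

-- ===== PRECONDITION & SPEC =====
def Spec_get_question_position (arr : List Int) (header_arr : List Int) (button_arr : List Int) (out : List Int) : Prop := out = get_question_position_alt arr header_arr button_arr
instance (arr : List Int) (header_arr : List Int) (button_arr : List Int) (out : List Int) : Decidable (Spec_get_question_position arr header_arr button_arr out) := by unfold Spec_get_question_position; infer_instance

-- ===== CLAIM (what is proved, stated in full; the proofs are below) =====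
def Claim_equal_get_question_position : Prop := ∀ (arr : List Int) (header_arr : List Int) (button_arr : List Int), Dom_get_question_position arr header_arr button_arr → Spec_get_question_position arr header_arr button_arr (get_question_position arr header_arr button_arr)

-- ===== LEMMAS AND PROOFS =====

-- The window of positions the loop still has to visit: pos, pos+1, ..., pos+f-1.
def qpWindow : Int → Nat → List Int
  | _, 0 => []
  | pos, f + 1 => pos :: qpWindow (pos + 1) f

theorem mem_qpWindow_le {x : Int} : ∀ {f : Nat} {pos : Int}, x ∈ qpWindow pos f → pos ≤ x := by
  intro f
  induction f with
  | zero => intro pos h; simp [qpWindow] at h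
  | succ f ih =>
    intro pos h
    rcases (by simpa [qpWindow] using h : x = pos ∨ x ∈ qpWindow (pos + 1) f) with h | h
    · omega
    · have := ih h; omega

theorem pyRange_eq_qpWindow : ∀ (f : Nat) (pos : Int),
    PySem.List.pyRange pos (pos + f) 1 = qpWindow pos f := by
  intro f
  induction f with
  | zero =>
    intro pos
    simp only [Nat.cast_zero, add_zero, qpWindow]
    exact PySem.List.pyRange_one_eq_nil (by omega)
  | succ f ih =>
    intro pos
    rw [PySem.List.pyRange_one_cons (by push_cast; omega)]
    have harith : pos + ((f + 1 : Nat) : Int) = (pos + 1) + (f : Int) := by push_cast; ring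
    rw [harith]
    simpa [qpWindow] using congrArg (pos :: ·) (ih (pos + 1))

-- B's range(stop) is exactly the takeWhile-prefix of the window before the
-- first position p with c p = true.
theorem pyRange_stop_eq_takeWhile (c : Int → Bool) :
    ∀ (f : Nat) (pos : Int),
      PySem.List.pyRange pos (((qpWindow pos f).find? c).getD (pos + f)) 1
        = (qpWindow pos f).takeWhile (fun x => !c x) := by
  intro f
  induction f with
  | zero =>
    intro pos
    simp only [qpWindow, List.find?_nil, Option.getD_none, Nat.cast_zero, add_zero,
      List.takeWhile_nil]
    exact PySem.List.pyRange_one_eq_nil (by omega)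
  | succ f ih =>
    intro pos
    by_cases hc : c pos
    · rw [show (qpWindow pos (f + 1)) = pos :: qpWindow (pos + 1) f from rfl,
        List.find?_cons_of_pos hc, Option.getD_some,
        PySem.List.pyRange_one_eq_nil (le_refl pos)]
      simp [List.takeWhile_cons, hc]
    · have hE : pos < ((qpWindow (pos + 1) f).find? c).getD ((pos + 1) + (f : Int)) := by
        cases hfo : (qpWindow (pos + 1) f).find? c with
        | none => simp; omega
        | some x =>
          have hx : x ∈ qpWindow (pos + 1) f := List.mem_of_find?_eq_some hfo
          have := mem_qpWindow_le hx
          simp; omega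
      rw [show (qpWindow pos (f + 1)) = pos :: qpWindow (pos + 1) f from rfl,
        List.find?_cons_of_neg hc,
        show pos + ((f + 1 : Nat) : Int) = (pos + 1) + (f : Int) by push_cast; ring,
        PySem.List.pyRange_one_cons hE, List.takeWhile_cons]
      simp only [hc, Bool.not_false, if_true]
      exact congrArg (pos :: ·) (ih (pos + 1))

-- Main invariant: A's loop equals filter-after-takeWhile over the window.
theorem getQPLoop_eq (header_arr button_arr : List Int) :
    ∀ (f : Nat) (pos : Int),
      getQPLoop header_arr button_arr f pos
        = ((qpWindow pos f).takeWhile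
            (fun x => !(!header_arr.contains x && button_arr.contains x))).filter
            (fun p => !header_arr.contains p) := by
  intro f
  induction f with
  | zero => intro pos; simp [getQPLoop, qpWindow]
  | succ f ih =>
    intro pos
    by_cases hh : pos ∈ header_arr
    · simp only [getQPLoop, qpWindow, List.takeWhile_cons, List.filter_cons,
        List.contains_eq_mem, hh, decide_true, Bool.not_true, Bool.false_and,
        Bool.not_false, if_true]
      simpa using ih (pos + 1)
    · by_cases hb : pos ∈ button_arr
      · simp [getQPLoop, qpWindow, List.takeWhile_cons, hh, hb]
      · simp only [getQPLoop, qpWindow, List.takeWhile_cons, List.filter_cons,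
          List.contains_eq_mem, hh, hb, decide_false, Bool.not_false, Bool.and_false,
          Bool.not_true, Bool.false_eq_true, if_false, if_true]
        rw [ih (pos + 1)]
        simp

-- ===== VERDICT (by name: the statement is the Claim_ definition above) =====
theorem get_question_position_spec : Claim_equal_get_question_position := by
  intro arr header_arr button_arr _
  show getQPLoop header_arr button_arr arr.length 0 =
    (PySem.List.pyRange 0
        (((PySem.List.pyRange 0 (arr.length : Int) 1).find?
            (fun p => !header_arr.contains p && button_arr.contains p)).getD (arr.length : Int)) 1).filter
      (fun p => !header_arr.contains p)
  have hr : PySem.List.pyRange 0 ((arr.length : Int)) 1 = qpWindow 0 arr.length := by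
    simpa using pyRange_eq_qpWindow arr.length 0
  have hs := pyRange_stop_eq_takeWhile
    (fun p => !header_arr.contains p && button_arr.contains p) arr.length 0
  simp only [zero_add] at hs
  rw [getQPLoop_eq, hr, hs]
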